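-- pv_equiv track=rewrite | github.com/henry-luo/lambda | test/benchmark/jetstream/crypto_sha1.py | binb2hex
-- ===== SOURCE A (Python) =====
-- def binb2hex(binarray):
--     hex_chars = "0123456789abcdef"
--     result = []
--     for i in range(len(binarray) * 4):
--         word_idx = i >> 2
--         byte_shift = (3 - (i % 4)) * 8
--         hi = (binarray[word_idx] >> (byte_shift + 4)) & 15
--         lo = (binarray[word_idx] >> byte_shift) & 15
--         result.append(hex_chars[hi])
--         result.append(hex_chars[lo])
--     return ''.join(result)
-- ===== SOURCE B (Python) =====
-- def binb2hex(binarray):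
--     return ''.join('%08x' % (w & 0xffffffff) for w in binarray)
-- ===== Notes on version B (the rewrite author's own statement) =====
-- stated objective: simpler
-- what changed: Replaces the flat per-nibble index loop (word_idx/byte_shift arithmetic and a hand-rolled hex_chars table) by a single join over the words, each word masked to 32 bits and formatted with '%08x'.
import Mathlib
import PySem

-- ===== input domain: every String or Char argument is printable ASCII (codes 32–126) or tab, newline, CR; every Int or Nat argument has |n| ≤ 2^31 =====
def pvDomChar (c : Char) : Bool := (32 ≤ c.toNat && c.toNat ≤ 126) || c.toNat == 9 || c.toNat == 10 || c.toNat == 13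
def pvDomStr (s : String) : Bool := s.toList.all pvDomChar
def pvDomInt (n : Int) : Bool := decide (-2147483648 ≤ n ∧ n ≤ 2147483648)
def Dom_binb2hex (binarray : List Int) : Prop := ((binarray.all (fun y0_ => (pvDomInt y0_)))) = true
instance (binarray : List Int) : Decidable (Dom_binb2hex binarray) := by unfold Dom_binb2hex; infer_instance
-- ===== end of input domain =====

-- B replaces A's flat per-nibble index loop by one 8-digit '%08x' format per 32-bit-masked word; objective: simpler.

-- ===== PORT A =====
-- literal port of A: a flat loop over nibble-pair index i in range(len*4), extracting hi/lo
-- nibbles of binarray[i >> 2] by shift/mask and indexing hex_chars; ''.join of 1-char strings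
-- is String.ofList. (shift counts are nonnegative on every iteration, so '.toNat' is exact)
def binb2hex (binarray : List Int) : String :=
  let hexChars := "0123456789abcdef"
  let result : List Char :=
    (PySem.List.pyRange 0 ((binarray.length : Int) * 4) 1).foldl
      (fun (acc : List Char) (i : Int) =>
        let wordIdx : Int := i >>> (2 : Nat)
        let byteShift := (3 - PySem.Int.mod i 4) * 8
        let w := (PySem.List.pyGet? binarray wordIdx).getD 0
        let hi := PySem.Int.band (w >>> (byteShift + 4).toNat) 15
        let lo := PySem.Int.band (w >>> byteShift.toNat) 15
        acc ++ [(PySem.Str.pyGet? hexChars hi).getD ' ',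
                (PySem.Str.pyGet? hexChars lo).getD ' ']) []
  String.ofList result

-- ===== PORT B =====
-- hand port of the format call '%08x' % v, used with 0 ≤ v < 2^32 only:
-- the 8 hexadecimal digits of v, most significant first (exact there)
def hexDigit (d : Nat) : Char := "0123456789abcdef".toList.getD d ' '

def hex8go : Nat → Nat → List Char
  | 0, _ => []
  | k + 1, v => hex8go k (v / 16) ++ [hexDigit (v % 16)]

def binb2hex_alt (binarray : List Int) : String :=
  PySem.Str.join ""
    (binarray.map (fun w => String.ofList (hex8go 8 ((PySem.Int.band w 4294967295).toNat))))

-- ===== PRECONDITION & SPEC =====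
def Spec_binb2hex (binarray : List Int) (out : String) : Prop := out = binb2hex_alt binarray
instance (binarray : List Int) (out : String) : Decidable (Spec_binb2hex binarray out) := by unfold Spec_binb2hex; infer_instance

-- ===== CLAIM (what is proved, stated in full; the proofs are below) =====
def Claim_equal_binb2hex : Prop := ∀ (binarray : List Int), Dom_binb2hex binarray → Spec_binb2hex binarray (binb2hex binarray)

-- ===== LEMMAS AND PROOFS =====

theorem band15 (w : Int) : PySem.Int.band w 15 = w % 16 := by
  have key : ∀ u : Nat, u &&& 15 = u % 16 := fun u => by
    simpa using Nat.and_two_pow_sub_one_eq_mod u 4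
  unfold PySem.Int.band
  split_ifs with h h' h' <;>
    first
      | omega
      | (simp only [show ((15:Int).toNat = 15) from rfl, Nat.and_comm 15, key]; omega)

theorem bandM (w : Int) : PySem.Int.band w 4294967295 = w % 4294967296 := by
  have key : ∀ u : Nat, u &&& 4294967295 = u % 4294967296 := fun u => by
    simpa using Nat.and_two_pow_sub_one_eq_mod u 32
  unfold PySem.Int.band
  split_ifs with h h' h' <;>
    first
      | omega
      | (simp only [show ((4294967295:Int).toNat = 4294967295) from rfl,
            Nat.and_comm 4294967295, key]; omega)

theorem digit_bridge (m : Nat) (hm : m < 16) :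
    (PySem.Str.pyGet? "0123456789abcdef" (m : Int)).getD ' ' = hexDigit m := by
  revert hm; revert m; decide

theorem nib_digit (x : Int) (m : Nat) (hm : m < 16) (hx : x = (m : Int)) :
    (PySem.Str.pyGet? "0123456789abcdef" x).getD ' ' = hexDigit m := by
  subst hx; exact digit_bridge m hm

-- the 8 hex chars A's loop emits for one word w = the 8 hex digits of w & 0xffffffff
theorem wordA_eq (w : Int) :
    [(PySem.Str.pyGet? "0123456789abcdef" (PySem.Int.band (w >>> (28:Nat)) 15)).getD ' ',
     (PySem.Str.pyGet? "0123456789abcdef" (PySem.Int.band (w >>> (24:Nat)) 15)).getD ' ',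
     (PySem.Str.pyGet? "0123456789abcdef" (PySem.Int.band (w >>> (20:Nat)) 15)).getD ' ',
     (PySem.Str.pyGet? "0123456789abcdef" (PySem.Int.band (w >>> (16:Nat)) 15)).getD ' ',
     (PySem.Str.pyGet? "0123456789abcdef" (PySem.Int.band (w >>> (12:Nat)) 15)).getD ' ',
     (PySem.Str.pyGet? "0123456789abcdef" (PySem.Int.band (w >>> (8:Nat)) 15)).getD ' ',
     (PySem.Str.pyGet? "0123456789abcdef" (PySem.Int.band (w >>> (4:Nat)) 15)).getD ' ',
     (PySem.Str.pyGet? "0123456789abcdef" (PySem.Int.band (w >>> (0:Nat)) 15)).getD ' ']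
    = hex8go 8 ((PySem.Int.band w 4294967295).toNat) := by
  rw [bandM]
  simp only [hex8go, List.append_assoc, List.singleton_append, List.nil_append,
    band15, Int.shiftRight_eq_div_pow]
  norm_num
  refine ⟨?_, ?_, ?_, ?_, ?_, ?_, ?_, ?_⟩ <;> exact nib_digit _ _ (by omega) (by omega)

-- the two chars A's loop body appends at index i (its body, zeta-reduced)
def nibPair (xs : List Int) (i : Int) : List Char :=
  [(PySem.Str.pyGet? "0123456789abcdef"
      (PySem.Int.band (((PySem.List.pyGet? xs (i >>> (2:Nat))).getD 0)
        >>> ((3 - PySem.Int.mod i 4) * 8 + 4).toNat) 15)).getD ' ',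
   (PySem.Str.pyGet? "0123456789abcdef"
      (PySem.Int.band (((PySem.List.pyGet? xs (i >>> (2:Nat))).getD 0)
        >>> ((3 - PySem.Int.mod i 4) * 8).toNat) 15)).getD ' ']

theorem nibPair_prefix (xs : List Int) (w : Int) (i : Int) (h0 : 0 ≤ i)
    (h1 : i < (xs.length : Int) * 4) : nibPair (xs ++ [w]) i = nibPair xs i := by
  have hsh : i >>> (2:Nat) = i / 4 := by
    rw [Int.shiftRight_eq_div_pow]; norm_num
  have hlt : (i / 4).toNat < xs.length := by omega
  unfold nibPair
  have hget : PySem.List.pyGet? (xs ++ [w]) (i / 4) = PySem.List.pyGet? xs (i / 4) := by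
    rw [PySem.List.pyGet?_of_nonneg (xs ++ [w]) (by omega),
      PySem.List.pyGet?_of_nonneg xs (by omega), List.getElem?_append_left hlt]
  rw [hsh, hget]

theorem nibPair_word (xs : List Int) (w : Int) (i j : Int) (hj : 0 ≤ j) (hj4 : j < 4)
    (hi : i = (xs.length : Int) * 4 + j) :
    nibPair (xs ++ [w]) i
      = [(PySem.Str.pyGet? "0123456789abcdef"
            (PySem.Int.band (w >>> (((3 - j) * 8 + 4).toNat)) 15)).getD ' ',
         (PySem.Str.pyGet? "0123456789abcdef"
            (PySem.Int.band (w >>> (((3 - j) * 8).toNat)) 15)).getD ' '] := by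
  subst hi
  have hsh : ((xs.length : Int) * 4 + j) >>> (2:Nat) = (xs.length : Int) := by
    rw [Int.shiftRight_eq_div_pow]; norm_num; omega
  have hmod : PySem.Int.mod ((xs.length : Int) * 4 + j) 4 = j := by
    rw [PySem.Int.mod_eq_emod_of_pos (by norm_num)]; omega
  unfold nibPair
  rw [hsh, hmod, show PySem.List.pyGet? (xs ++ [w]) (xs.length : Int)
      = some w from PySem.List.pyGet?_append_length xs [] w]
  rfl

-- A's flat nibble loop, seen as a flatMap over indices, equals B's per-word flatMap
theorem flat_loop (xs : List Int) :
    (PySem.List.pyRange 0 ((xs.length : Int) * 4) 1).flatMap (nibPair xs)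
      = xs.flatMap (fun w => hex8go 8 ((PySem.Int.band w 4294967295).toNat)) := by
  induction xs using List.reverseRecOn with
  | nil => simp [PySem.List.pyRange_one_eq_nil]
  | append_singleton xs w ih =>
    have hn : (((xs ++ [w]).length : Int)) * 4 = (xs.length : Int) * 4 + 4 := by
      simp; ring
    rw [hn, PySem.List.pyRange_one_append 0 ((xs.length : Int) * 4) _ (by positivity) (by omega),
      List.flatMap_append,
      List.flatMap_congr (fun i hi => nibPair_prefix xs w i
        (PySem.List.mem_pyRange_one.mp hi).1 (PySem.List.mem_pyRange_one.mp hi).2),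
      ih, List.flatMap_append]
    congr 1
    rw [PySem.List.pyRange_one_cons (by omega), PySem.List.pyRange_one_cons (by omega),
      PySem.List.pyRange_one_cons (by omega), PySem.List.pyRange_one_cons (by omega),
      PySem.List.pyRange_one_eq_nil (by omega)]
    simp only [List.flatMap_cons, List.flatMap_nil, List.append_nil]
    rw [nibPair_word xs w ((xs.length : Int) * 4) 0 (by omega) (by omega) (by ring),
      nibPair_word xs w ((xs.length : Int) * 4 + 1) 1 (by omega) (by omega) (by ring),
      nibPair_word xs w ((xs.length : Int) * 4 + 1 + 1) 2 (by omega) (by omega) (by ring),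
      nibPair_word xs w ((xs.length : Int) * 4 + 1 + 1 + 1) 3 (by omega) (by omega) (by ring)]
    simp only [show (((3:Int)-0)*8+4).toNat = 28 from by decide, show (((3:Int)-0)*8).toNat = 24 from by decide,
      show (((3:Int)-1)*8+4).toNat = 20 from by decide, show (((3:Int)-1)*8).toNat = 16 from by decide,
      show (((3:Int)-2)*8+4).toNat = 12 from by decide, show (((3:Int)-2)*8).toNat = 8 from by decide,
      show (((3:Int)-3)*8+4).toNat = 4 from by decide, show (((3:Int)-3)*8).toNat = 0 from by decide,
      List.cons_append, List.nil_append]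
    exact wordA_eq w

theorem join_mk (ls : List (List Char)) :
    PySem.Str.join "" (ls.map String.ofList) = String.ofList ls.flatten := by
  rw [← String.toList_inj, PySem.Str.toList_join]
  simp only [List.map_map]
  induction ls with
  | nil => simp [PySem.Chars.join_nil]
  | cons x r ih =>
    cases r with
    | nil => simp [PySem.Chars.join_singleton]
    | cons y t =>
      simp only [List.map_cons, Function.comp] at ih ⊢
      rw [PySem.Chars.join_cons_cons]
      simp at ih ⊢
      rw [ih]

-- ===== VERDICT (by name: the statement is the Claim_ definition above) =====
theorem binb2hex_spec : Claim_equal_binb2hex := by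
  intro xs _
  unfold Spec_binb2hex binb2hex binb2hex_alt
  rw [show (xs.map fun w => String.ofList (hex8go 8 ((PySem.Int.band w 4294967295).toNat)))
      = (xs.map (fun w => hex8go 8 ((PySem.Int.band w 4294967295).toNat))).map String.ofList from by
    rw [List.map_map]; rfl]
  rw [join_mk]
  show String.ofList ((PySem.List.pyRange 0 ((xs.length : Int) * 4) 1).foldl
      (fun (acc : List Char) (i : Int) => acc ++ nibPair xs i) []) = _
  rw [PySem.List.foldl_append_eq_flatMap, List.nil_append, flat_loop, List.flatMap_def]
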